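-- pv_equiv track=rewrite | github.com/jahnzh/immuneML | immuneML/encodings/motif_encoding/PositionalMotifHelper.py | sort_motifs_by_index
-- ===== SOURCE A (Python) =====
-- def sort_motifs_by_index(motifs):
--     sorted_motifs = {}
--
--     for index, amino_acids in motifs:
--         if tuple(index) not in sorted_motifs:
--             sorted_motifs[tuple(index)] = [amino_acids]
--         else:
--             sorted_motifs[tuple(index)].append(amino_acids)
--
--     return sorted_motifs
-- ===== SOURCE B (Python) =====
-- def sort_motifs_by_index(motifs):
--     # Collect distinct index tuples in first-occurrence order, then build each
--     # group with one comprehension per key (no mutable dict bucketing).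
--     keys = []
--     for index, _ in motifs:
--         t = tuple(index)
--         if t not in keys:
--             keys.append(t)
--     return {k: [aa for i, aa in motifs if tuple(i) == k] for k in keys}
-- ===== Notes on version B (the rewrite author's own statement) =====
-- stated objective: alternative
-- what changed: B replaces A's single-pass dict bucketing (insert-or-append per element) with a two-phase scheme: first deduplicate the index tuples in first-occurrence order, then build each group's amino-acid list by filtering the whole input per key.
import Mathlib
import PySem

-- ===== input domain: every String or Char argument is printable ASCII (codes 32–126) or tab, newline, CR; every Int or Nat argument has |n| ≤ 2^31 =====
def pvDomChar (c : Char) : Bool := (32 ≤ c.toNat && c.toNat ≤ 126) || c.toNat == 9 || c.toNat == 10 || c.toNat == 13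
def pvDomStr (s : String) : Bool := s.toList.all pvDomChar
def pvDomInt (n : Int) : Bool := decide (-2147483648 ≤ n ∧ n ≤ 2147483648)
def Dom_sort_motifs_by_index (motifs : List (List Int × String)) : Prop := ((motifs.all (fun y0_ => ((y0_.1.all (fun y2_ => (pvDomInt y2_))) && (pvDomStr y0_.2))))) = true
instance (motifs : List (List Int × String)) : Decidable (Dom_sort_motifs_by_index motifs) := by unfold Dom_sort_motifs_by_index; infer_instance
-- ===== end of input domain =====

-- B groups by deduplicating keys first and filtering per key instead of A's single-pass dict bucketing; objective: alternative decomposition.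

-- ===== PORT A =====
def sort_motifs_by_index (motifs : List (List Int × String)) : List (List Int × List String) :=
  (motifs.foldl
    (fun d p =>
      if d.contains p.1 = false then d.insert p.1 [p.2]
      else d.modify p.1 [] (fun l => l ++ [p.2]))
    PySem.Dict.empty).items

-- ===== PORT B =====
def sort_motifs_by_index_alt (motifs : List (List Int × String)) : List (List Int × List String) :=
  let keys := motifs.foldl (fun ks p => if p.1 ∈ ks then ks else ks ++ [p.1]) []
  keys.map (fun k => (k, (motifs.filter (fun p => p.1 == k)).map (fun p => p.2)))

-- ===== PRECONDITION & SPEC =====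
def Spec_sort_motifs_by_index (motifs : List (List Int × String)) (out : List (List Int × List String)) : Prop := out = sort_motifs_by_index_alt motifs
instance (motifs : List (List Int × String)) (out : List (List Int × List String)) : Decidable (Spec_sort_motifs_by_index motifs out) := by unfold Spec_sort_motifs_by_index; infer_instance

-- ===== CLAIM (what is proved, stated in full; the proofs are below) =====
def Claim_equal_sort_motifs_by_index : Prop := ∀ (motifs : List (List Int × String)), Dom_sort_motifs_by_index motifs → Spec_sort_motifs_by_index motifs (sort_motifs_by_index motifs)

-- ===== LEMMAS AND PROOFS =====

-- A's insert-or-append step is exactly a Python-style d.modify with default [].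
theorem stepA_eq_modify (d : PySem.Dict (List Int) (List String)) (p : List Int × String) :
    (if d.contains p.1 = false then d.insert p.1 [p.2]
     else d.modify p.1 [] (fun l => l ++ [p.2]))
      = d.modify p.1 [] (fun l => l ++ [p.2]) := by
  by_cases h : d.contains p.1 = false
  · simp only [h, if_true]
    have : d.getD p.1 [] = [] := PySem.Dict.getD_of_not_contains d [] h
    simp [PySem.Dict.modify, this]
  · simp [h]

theorem foldA_eq_foldModify (motifs : List (List Int × String)) :
    motifs.foldl
      (fun d p =>
        if d.contains p.1 = false then d.insert p.1 [p.2]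
        else d.modify p.1 [] (fun l => l ++ [p.2]))
      PySem.Dict.empty
    = motifs.foldl (fun d p => d.modify p.1 [] (fun l => l ++ [p.2])) PySem.Dict.empty := by
  apply PySem.List.foldl_congr_mem
  intro d p _
  exact stepA_eq_modify d p

-- B's key-collection loop is PySem.Set.ofList of the index lists.
theorem keysB_eq_ofList (motifs : List (List Int × String)) :
    motifs.foldl (fun ks p => if p.1 ∈ ks then ks else ks ++ [p.1]) []
      = PySem.Set.ofList (motifs.map (fun p => p.1)) := by
  rw [← PySem.Set.update_nil_left, PySem.Set.update_map_eq_foldl_add]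
  apply PySem.List.foldl_congr_mem
  intro ks p _
  simp [PySem.Set.add]

-- ===== VERDICT (by name: the statement is the Claim_ definition above) =====
theorem sort_motifs_by_index_spec : Claim_equal_sort_motifs_by_index := by
  intro motifs _
  unfold Spec_sort_motifs_by_index sort_motifs_by_index sort_motifs_by_index_alt
  rw [foldA_eq_foldModify, keysB_eq_ofList]
  set d := motifs.foldl (fun d p => d.modify p.1 [] (fun l => l ++ [p.2])) PySem.Dict.empty with hd
  have hkeys : d.keys = PySem.Set.ofList (motifs.map (fun p => p.1)) := by
    rw [hd, PySem.Dict.keys_foldl_modify_key]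
    simp [PySem.Dict.keys_empty, PySem.Set.update_nil_left]
  have hnodup : d.keys.Nodup := by
    rw [hd]
    exact PySem.Dict.nodup_keys_foldl_modify_key motifs (fun p => p.1) [] (fun d p l => l ++ [p.2])
      PySem.Dict.empty (by simp [PySem.Dict.keys_empty])
  rw [PySem.Dict.items_eq_map_keys d hnodup [], hkeys]
  apply List.map_congr_left
  intro k _
  have := PySem.Dict.getD_foldl_modify_append (d := PySem.Dict.empty) (l := motifs) (c := k)
  rw [hd, this]
  simp [PySem.Dict.getD_empty]
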